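-- pv_equiv track=rewrite | github.com/TensorLock/TensorLock | code/step3_merge/utils/ties_recovery.py | get_common_keys
-- ===== SOURCE A (Python) =====
-- def normalize_key(key):
--     if key.startswith("model."):
--         return key[6:]
--     return key
--
-- def get_common_keys(all_vectors, model_names, max_keys=15):
--     if not model_names:
--         return []
--
--     common_keys = set(all_vectors[model_names[0]].keys())
--     for name in model_names[1:]:
--         common_keys &= set(all_vectors[name].keys())
--
--     if common_keys:
--         return sorted(list(common_keys))[:max_keys]
--
--     normalized_keys_map = {}
--     for name in model_names:
--         normalized_keys_map[name] = {normalize_key(k): k for k in all_vectors[name].keys()}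
--
--     common_normalized = set(normalized_keys_map[model_names[0]].keys())
--     for name in model_names[1:]:
--         common_normalized &= set(normalized_keys_map[name].keys())
--
--     if not common_normalized:
--         return []
--
--     result = []
--     for norm_key in sorted(list(common_normalized))[:max_keys]:
--         result.append(normalized_keys_map[model_names[0]][norm_key])
--
--     return result
-- ===== SOURCE B (Python) =====
-- def normalize_key(key):
--     if key.startswith("model."):
--         return key[6:]
--     return key
--
-- def get_common_keys(all_vectors, model_names, max_keys=15):
--     if not model_names:
--         return []
--     n = len(model_names)
--     counts = {}
--     for name in model_names:
--         for k in set(all_vectors[name].keys()):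
--             counts[k] = counts.get(k, 0) + 1
--     common = [k for k in counts if counts[k] == n]
--     if common:
--         return sorted(common)[:max_keys]
--     norm_counts = {}
--     for name in model_names:
--         for k in {normalize_key(k) for k in all_vectors[name].keys()}:
--             norm_counts[k] = norm_counts.get(k, 0) + 1
--     common_norm = [k for k in norm_counts if norm_counts[k] == n]
--     if not common_norm:
--         return []
--     back = {normalize_key(k): k for k in all_vectors[model_names[0]].keys()}
--     return [back[k] for k in sorted(common_norm)[:max_keys]]
-- ===== Notes on version B (the rewrite author's own statement) =====
-- stated objective: alternative
-- what changed: Replaces A's two repeated set-intersection folds (and its dict of per-model normalized-key maps) by a single occurrence-counting dict per phase: each model's (deduplicated) key set increments a counter, and the common keys are exactly those counted in all len(model_names) models; only the first model's normalized-key back-map is ever built.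
import Mathlib
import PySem

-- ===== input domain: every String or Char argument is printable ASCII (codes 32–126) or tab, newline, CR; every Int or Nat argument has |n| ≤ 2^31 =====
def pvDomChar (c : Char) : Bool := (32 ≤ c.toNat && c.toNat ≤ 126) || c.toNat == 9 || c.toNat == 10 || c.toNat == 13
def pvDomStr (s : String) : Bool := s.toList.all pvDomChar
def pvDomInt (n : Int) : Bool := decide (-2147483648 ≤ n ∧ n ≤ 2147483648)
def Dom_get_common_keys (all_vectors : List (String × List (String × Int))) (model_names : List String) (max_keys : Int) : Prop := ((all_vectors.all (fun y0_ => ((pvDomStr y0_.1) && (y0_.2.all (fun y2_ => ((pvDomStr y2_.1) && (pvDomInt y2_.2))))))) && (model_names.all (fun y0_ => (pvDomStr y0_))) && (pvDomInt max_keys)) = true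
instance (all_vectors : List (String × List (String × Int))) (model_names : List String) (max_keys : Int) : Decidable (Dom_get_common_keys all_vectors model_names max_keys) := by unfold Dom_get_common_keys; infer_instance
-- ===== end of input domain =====

-- B replaces A's two repeated set-intersection folds (plus a per-model dict of normalized-key maps) by a single
-- occurrence-counting dict per phase: keys present in count == len(model_names) models are the common ones (objective: alternative).

-- shared helper: normalize_key (identical in Source A and Source B)
def normalizeKey (key : String) : String :=
  if PySem.Str.startswith key "model." then PySem.Str.slice key (some 6) none else key

-- ===== PORT A =====
def get_common_keys (all_vectors : List (String × List (String × Int))) (model_names : List String) (max_keys : Int) : List String :=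
  match model_names with
  | [] => []
  | n0 :: rest =>
    let av := PySem.Dict.ofList all_vectors
    -- common_keys = set(keys of model 0); for name in rest: common_keys &= set(keys of name)
    let common := rest.foldl
      (fun acc name => PySem.Set.inter acc (PySem.Set.ofList (PySem.Dict.ofList (av.getD name [])).keys))
      (PySem.Set.ofList (PySem.Dict.ofList (av.getD n0 [])).keys)
    if common ≠ [] then
      PySem.List.slice (PySem.List.sorted common (fun x => x)) none (some max_keys)
    else
      -- normalized_keys_map[name] = {normalize_key(k): k for k in keys of name}
      let nm : PySem.Dict String (PySem.Dict String String) :=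
        (n0 :: rest).foldl
          (fun d name => d.insert name (PySem.Dict.ofList (((PySem.Dict.ofList (av.getD name [])).keys).map (fun k => (normalizeKey k, k)))))
          PySem.Dict.empty
      let commonNorm := rest.foldl
        (fun acc name => PySem.Set.inter acc (PySem.Set.ofList (nm.getD name PySem.Dict.empty).keys))
        (PySem.Set.ofList (nm.getD n0 PySem.Dict.empty).keys)
      if commonNorm = [] then []
      else
        (PySem.List.slice (PySem.List.sorted commonNorm (fun x => x)) none (some max_keys)).foldl
          (fun res nk => res ++ [(nm.getD n0 PySem.Dict.empty).getD nk ""]) []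

-- ===== PORT B =====
def get_common_keys_alt (all_vectors : List (String × List (String × Int))) (model_names : List String) (max_keys : Int) : List String :=
  match model_names with
  | [] => []
  | n0 :: rest =>
    let av := PySem.Dict.ofList all_vectors
    let n : Int := ((n0 :: rest).length : Int)
    -- counts[k] = number of models whose key set contains k
    let counts : PySem.Dict String Int :=
      (n0 :: rest).foldl
        (fun c name => (PySem.Set.ofList (PySem.Dict.ofList (av.getD name [])).keys).foldl
            (fun c k => c.insert k (c.getD k 0 + 1)) c)
        PySem.Dict.empty
    let common := counts.keys.filter (fun k => counts.getD k 0 == n)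
    if common ≠ [] then
      PySem.List.slice (PySem.List.sorted common (fun x => x)) none (some max_keys)
    else
      let ncounts : PySem.Dict String Int :=
        (n0 :: rest).foldl
          (fun c name => (PySem.Set.ofList (((PySem.Dict.ofList (av.getD name [])).keys).map normalizeKey)).foldl
              (fun c k => c.insert k (c.getD k 0 + 1)) c)
          PySem.Dict.empty
      let commonNorm := ncounts.keys.filter (fun k => ncounts.getD k 0 == n)
      if commonNorm = [] then []
      else
        let back := PySem.Dict.ofList (((PySem.Dict.ofList (av.getD n0 [])).keys).map (fun k => (normalizeKey k, k)))
        (PySem.List.slice (PySem.List.sorted commonNorm (fun x => x)) none (some max_keys)).map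
          (fun k => back.getD k "")

-- ===== PRECONDITION & SPEC =====
-- Pre_ excludes exactly the inputs where Python A raises KeyError: some model name absent from all_vectors.
def Pre_get_common_keys (all_vectors : List (String × List (String × Int))) (model_names : List String) (max_keys : Int) : Prop :=
  ∀ name ∈ model_names, (PySem.Dict.ofList all_vectors).contains name = true
instance (all_vectors : List (String × List (String × Int))) (model_names : List String) (max_keys : Int) : Decidable (Pre_get_common_keys all_vectors model_names max_keys) := by unfold Pre_get_common_keys; infer_instance

def pvWitness_get_common_keys : (List (String × List (String × Int))) × List String × Int :=
  ([("m1", [("a", 1), ("model.b", 2)]), ("m2", [("a", 3), ("b", 4)])], ["m1", "m2"], 15)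

def Spec_get_common_keys (all_vectors : List (String × List (String × Int))) (model_names : List String) (max_keys : Int) (out : List String) : Prop := out = get_common_keys_alt all_vectors model_names max_keys
instance (all_vectors : List (String × List (String × Int))) (model_names : List String) (max_keys : Int) (out : List String) : Decidable (Spec_get_common_keys all_vectors model_names max_keys out) := by unfold Spec_get_common_keys; infer_instance

-- ===== CLAIM (what is proved, stated in full; the proofs are below) =====
def Claim_equal_get_common_keys : Prop := ∀ (all_vectors : List (String × List (String × Int))) (model_names : List String) (max_keys : Int), Dom_get_common_keys all_vectors model_names max_keys → Pre_get_common_keys all_vectors model_names max_keys → Spec_get_common_keys all_vectors model_names max_keys (get_common_keys all_vectors model_names max_keys)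

-- ===== LEMMAS AND PROOFS =====

-- membership in A's iterated set intersection
theorem pv_mem_foldl_inter (g : String → List String) (l : List String) (init : PySem.Set String) (x : String) :
    x ∈ l.foldl (fun acc name => PySem.Set.inter acc (g name)) init ↔ x ∈ init ∧ ∀ name ∈ l, x ∈ g name := by
  induction l generalizing init with
  | nil => simp
  | cons a t ih =>
    simp only [List.foldl_cons, ih, PySem.Set.mem_inter, List.mem_cons]
    constructor
    · rintro ⟨⟨h1, h2⟩, h3⟩
      exact ⟨h1, by rintro name (rfl | hm); exacts [h2, h3 name hm]⟩
    · rintro ⟨h1, h2⟩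
      exact ⟨⟨h1, h2 a (Or.inl rfl)⟩, fun name hm => h2 name (Or.inr hm)⟩

theorem pv_nodup_foldl_inter (g : String → List String) (l : List String) (init : PySem.Set String)
    (h : init.Nodup) : (l.foldl (fun acc name => PySem.Set.inter acc (g name)) init).Nodup := by
  induction l generalizing init with
  | nil => exact h
  | cons a t ih => exact ih _ (PySem.Set.nodup_inter _ _ h)

-- B's nested counting loop: the count of k is the number of models whose (deduped) key set contains k
theorem pv_counter_getD (g : String → List String) (hg : ∀ name, (g name).Nodup)
    (l : List String) (c : PySem.Dict String Int) (k : String) :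
    (l.foldl (fun c name => (g name).foldl (fun c k => c.insert k (c.getD k 0 + 1)) c) c).getD k 0
      = c.getD k 0 + ((l.countP (fun name => decide (k ∈ g name)) : Nat) : Int) := by
  induction l generalizing c with
  | nil => simp
  | cons a t ih =>
    simp only [List.foldl_cons, ih, PySem.Dict.getD_foldl_insert_add_one, List.countP_cons]
    by_cases hm : k ∈ g a
    · rw [List.count_eq_one_of_mem (hg a) hm]; simp [hm]; ring
    · rw [List.count_eq_zero_of_not_mem hm]; simp [hm]

theorem pv_counter_mem_keys (g : String → List String) (l : List String) (c : PySem.Dict String Int) (k : String) :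
    k ∈ (l.foldl (fun c name => (g name).foldl (fun c k => c.insert k (c.getD k 0 + 1)) c) c).keys
      ↔ k ∈ c.keys ∨ ∃ name ∈ l, k ∈ g name := by
  induction l generalizing c with
  | nil => simp
  | cons a t ih =>
    simp only [List.foldl_cons, ih, PySem.Dict.keys_foldl_insert, PySem.Set.mem_update, List.mem_cons]
    constructor
    · rintro ((h | h) | ⟨name, hm, hk⟩)
      exacts [Or.inl h, Or.inr ⟨a, Or.inl rfl, h⟩, Or.inr ⟨name, Or.inr hm, hk⟩]
    · rintro (h | ⟨name, (rfl | hm), hk⟩)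
      exacts [Or.inl (Or.inl h), Or.inl (Or.inr hk), Or.inr ⟨name, hm, hk⟩]

theorem pv_counter_nodup_keys (g : String → List String) (l : List String) (c : PySem.Dict String Int)
    (h : c.keys.Nodup) :
    (l.foldl (fun c name => (g name).foldl (fun c k => c.insert k (c.getD k 0 + 1)) c) c).keys.Nodup := by
  induction l generalizing c with
  | nil => exact h
  | cons a t ih => exact ih _ (PySem.Dict.nodup_keys_foldl_insert _ _ _ h)

-- same members + both duplicate-free ⇒ identical sorted lists
theorem pv_sorted_congr (xs ys : List String) (hx : xs.Nodup) (hy : ys.Nodup)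
    (h : ∀ a, a ∈ xs ↔ a ∈ ys) :
    PySem.List.sorted ys (fun x => x) = PySem.List.sorted xs (fun x => x) := by
  apply PySem.List.sorted_eq_of_perm_of_pairwise_lt
  · exact (PySem.List.sorted_perm xs _ false).trans ((List.perm_ext_iff_of_nodup hx hy).2 h)
  · have hnd : (PySem.List.sorted xs (fun x => x)).Nodup :=
      ((PySem.List.sorted_perm xs (fun x => x) false).nodup_iff).2 hx
    have hle := PySem.List.sorted_pairwise xs (fun x => x)
    exact (hle.and hnd).imp (fun h => lt_of_le_of_ne h.1 h.2)

-- the common-keys phase: A's intersection fold and B's count-filter sort to the same list and are empty together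
theorem pv_phase (g g' : String → List String) (hg : ∀ name, (g name).Nodup)
    (hg' : ∀ name, (g' name).Nodup)
    (hgg' : ∀ name x, x ∈ g name ↔ x ∈ g' name) (n0 : String) (rest : List String) :
    (PySem.List.sorted
        (((n0 :: rest).foldl (fun c name => (g name).foldl (fun c k => c.insert k (c.getD k 0 + 1)) c)
            (PySem.Dict.empty : PySem.Dict String Int)).keys.filter
          (fun k => ((n0 :: rest).foldl (fun c name => (g name).foldl (fun c k => c.insert k (c.getD k 0 + 1)) c)
            (PySem.Dict.empty : PySem.Dict String Int)).getD k 0 == (((n0 :: rest).length : Nat) : Int)))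
        (fun x => x)
      = PySem.List.sorted (rest.foldl (fun acc name => PySem.Set.inter acc (g' name)) (g' n0)) (fun x => x))
    ∧ ((rest.foldl (fun acc name => PySem.Set.inter acc (g' name)) (g' n0)) = []
        ↔ ((n0 :: rest).foldl (fun c name => (g name).foldl (fun c k => c.insert k (c.getD k 0 + 1)) c)
            (PySem.Dict.empty : PySem.Dict String Int)).keys.filter
          (fun k => ((n0 :: rest).foldl (fun c name => (g name).foldl (fun c k => c.insert k (c.getD k 0 + 1)) c)
            (PySem.Dict.empty : PySem.Dict String Int)).getD k 0 == (((n0 :: rest).length : Nat) : Int)) = []) := by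
  set C := (n0 :: rest).foldl (fun c name => (g name).foldl (fun c k => c.insert k (c.getD k 0 + 1)) c)
      (PySem.Dict.empty : PySem.Dict String Int) with hC
  set A := rest.foldl (fun acc name => PySem.Set.inter acc (g' name)) (g' n0) with hA
  set B := C.keys.filter (fun k => C.getD k 0 == (((n0 :: rest).length : Nat) : Int)) with hB
  have hmemA : ∀ x, x ∈ A ↔ ∀ name ∈ n0 :: rest, x ∈ g name := by
    intro x
    rw [hA, pv_mem_foldl_inter]
    simp only [List.forall_mem_cons, hgg']
  have hmemB : ∀ x, x ∈ B ↔ ∀ name ∈ n0 :: rest, x ∈ g name := by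
    intro x
    rw [hB, List.mem_filter]
    constructor
    · rintro ⟨-, hcnt⟩
      rw [beq_iff_eq, hC, pv_counter_getD g hg] at hcnt
      simp only [PySem.Dict.getD_empty, zero_add, Nat.cast_inj] at hcnt
      exact fun name hm => by
        have := List.countP_eq_length.1 hcnt name hm
        simpa using this
    · intro hall
      have hcnt : (n0 :: rest).countP (fun name => decide (x ∈ g name)) = (n0 :: rest).length :=
        List.countP_eq_length.2 (fun name hm => by simpa using hall name hm)
      refine ⟨?_, ?_⟩
      · rw [hC, pv_counter_mem_keys]
        exact Or.inr ⟨n0, List.mem_cons_self, hall n0 List.mem_cons_self⟩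
      · rw [beq_iff_eq, hC, pv_counter_getD g hg]
        simp [hcnt]
  have hmem : ∀ x, x ∈ B ↔ x ∈ A := fun x => (hmemB x).trans (hmemA x).symm
  have hndA : A.Nodup := pv_nodup_foldl_inter g' rest (g' n0) (hg' n0)
  have hndB : B.Nodup := by
    rw [hB]
    exact (pv_counter_nodup_keys g (n0 :: rest) _ (by simp [PySem.Dict.keys_empty])).filter _
  refine ⟨pv_sorted_congr A B hndA hndB (fun a => (hmem a).symm), ?_⟩
  constructor
  · intro h
    rw [List.eq_nil_iff_forall_not_mem] at h ⊢
    exact fun x hx => h x ((hmem x).1 hx)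
  · intro h
    rw [List.eq_nil_iff_forall_not_mem] at h ⊢
    exact fun x hx => h x ((hmem x).2 hx)

-- a fold of inserts at the model names, looked up at a name not in the list / in the list
theorem pv_getD_foldl_insertF_not_mem {ν : Type} [BEq ν] (F : String → ν) (l : List String)
    (d : PySem.Dict String ν) (n0 : String) (dflt : ν) (h : n0 ∉ l) :
    (l.foldl (fun d name => d.insert name (F name)) d).getD n0 dflt = d.getD n0 dflt := by
  induction l generalizing d with
  | nil => rfl
  | cons a t ih =>
    simp only [List.foldl_cons]
    rw [ih _ (fun hm => h (List.mem_cons_of_mem a hm)),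
      PySem.Dict.getD_insert_of_ne _ _ _ (fun he : n0 = a => h (he ▸ List.mem_cons_self))]

theorem pv_getD_foldl_insertF_mem {ν : Type} [BEq ν] (F : String → ν) (l : List String)
    (d : PySem.Dict String ν) (n0 : String) (dflt : ν) (h : n0 ∈ l) :
    (l.foldl (fun d name => d.insert name (F name)) d).getD n0 dflt = F n0 := by
  induction l generalizing d with
  | nil => cases h
  | cons a t ih =>
    simp only [List.foldl_cons]
    by_cases hm : n0 ∈ t
    · exact ih _ hm
    · have : n0 = a := by rcases List.mem_cons.1 h with h | h; exacts [h, absurd h hm]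
      subst this
      rw [pv_getD_foldl_insertF_not_mem F t _ _ _ hm, PySem.Dict.getD_insert_self]

-- keys of a dict comprehension {f k : k for k in l}: membership is membership in l.map f
theorem pv_mem_keys_ofList_pairs {ν : Type} (ps : List (String × ν)) (x : String) :
    x ∈ (PySem.Dict.ofList ps).keys ↔ x ∈ ps.map Prod.fst := by
  have h := PySem.Dict.keys_foldl_insert_key (ν := ν) ps Prod.fst (fun _ p => p.2) PySem.Dict.empty
  have he : PySem.Dict.ofList ps
      = ps.foldl (fun d x => d.insert (Prod.fst x) ((fun (_ : PySem.Dict String ν) (p : String × ν) => p.2) d x)) PySem.Dict.empty := rfl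
  rw [he, h, PySem.Dict.keys_empty]
  exact PySem.Set.mem_update _ _ _ |>.trans (by simp)

-- ===== VERDICT (by name: the statement is the Claim_ definition above) =====
theorem pv_main (all_vectors : List (String × List (String × Int))) (n0 : String) (rest : List String) (mk : Int) :
    get_common_keys all_vectors (n0 :: rest) mk = get_common_keys_alt all_vectors (n0 :: rest) mk := by
  simp only [get_common_keys, get_common_keys_alt]
  have hph := pv_phase
    (fun name => PySem.Set.ofList (PySem.Dict.ofList ((PySem.Dict.ofList all_vectors).getD name [])).keys)
    (fun name => PySem.Set.ofList (PySem.Dict.ofList ((PySem.Dict.ofList all_vectors).getD name [])).keys)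
    (fun name => PySem.Set.nodup_ofList _) (fun name => PySem.Set.nodup_ofList _)
    (fun name x => Iff.rfl) n0 rest
  rcases hph with ⟨hsort, hempty⟩
  by_cases hA : List.foldl
      (fun acc name =>
        PySem.Set.inter acc (PySem.Set.ofList (PySem.Dict.ofList ((PySem.Dict.ofList all_vectors).getD name [])).keys))
      (PySem.Set.ofList (PySem.Dict.ofList ((PySem.Dict.ofList all_vectors).getD n0 [])).keys) rest = []
  · conv_lhs => rw [if_neg (fun h => h hA)]
    conv_rhs => rw [if_neg (fun h => h (hempty.1 hA))]
    -- both fall through to the normalized phase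
    have hF : ∀ name ∈ n0 :: rest,
        ((n0 :: rest).foldl
            (fun d name => d.insert name (PySem.Dict.ofList
              (((PySem.Dict.ofList ((PySem.Dict.ofList all_vectors).getD name [])).keys).map (fun k => (normalizeKey k, k)))))
            PySem.Dict.empty).getD name PySem.Dict.empty
          = PySem.Dict.ofList
              (((PySem.Dict.ofList ((PySem.Dict.ofList all_vectors).getD name [])).keys).map (fun k => (normalizeKey k, k))) :=
      fun name hm => pv_getD_foldl_insertF_mem
        (fun name => PySem.Dict.ofList
          (((PySem.Dict.ofList ((PySem.Dict.ofList all_vectors).getD name [])).keys).map (fun k => (normalizeKey k, k))))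
        (n0 :: rest) _ name _ hm
    rw [hF n0 List.mem_cons_self,
        PySem.List.foldl_congr_mem rest _
          (fun acc name =>
            PySem.Set.inter acc (PySem.Set.ofList (PySem.Dict.ofList
              (((PySem.Dict.ofList ((PySem.Dict.ofList all_vectors).getD name [])).keys).map (fun k => (normalizeKey k, k)))).keys))
          _ (fun acc name hm => by rw [hF name (List.mem_cons_of_mem n0 hm)])]
    have hph2 := pv_phase
      (fun name => PySem.Set.ofList (((PySem.Dict.ofList ((PySem.Dict.ofList all_vectors).getD name [])).keys).map normalizeKey))
      (fun name => PySem.Set.ofList (PySem.Dict.ofList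
        (((PySem.Dict.ofList ((PySem.Dict.ofList all_vectors).getD name [])).keys).map (fun k => (normalizeKey k, k)))).keys)
      (fun name => PySem.Set.nodup_ofList _) (fun name => PySem.Set.nodup_ofList _)
      (fun name x => by
        rw [PySem.Set.mem_ofList, PySem.Set.mem_ofList, pv_mem_keys_ofList_pairs, List.map_map]
        rfl) n0 rest
    rcases hph2 with ⟨hsort2, hempty2⟩
    by_cases hA2 : List.foldl
        (fun acc name =>
          PySem.Set.inter acc (PySem.Set.ofList (PySem.Dict.ofList
            (((PySem.Dict.ofList ((PySem.Dict.ofList all_vectors).getD name [])).keys).map (fun k => (normalizeKey k, k)))).keys))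
        (PySem.Set.ofList (PySem.Dict.ofList
          (((PySem.Dict.ofList ((PySem.Dict.ofList all_vectors).getD n0 [])).keys).map (fun k => (normalizeKey k, k)))).keys) rest = []
    · conv_lhs => rw [if_pos hA2]
      conv_rhs => rw [if_pos (hempty2.1 hA2)]
    · conv_lhs => rw [if_neg hA2]
      conv_rhs => rw [if_neg (fun h => hA2 (hempty2.2 h))]
      rw [hsort2, PySem.List.foldl_append_singleton_eq_map]
      simp
  · conv_lhs => rw [if_pos hA]
    conv_rhs => rw [if_pos (fun h => hA (hempty.2 h))]
    rw [hsort]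

theorem get_common_keys_spec : Claim_equal_get_common_keys := by
  intro all_vectors model_names max_keys _ _
  unfold Spec_get_common_keys
  cases model_names with
  | nil => rfl
  | cons n0 rest => exact pv_main all_vectors n0 rest max_keys
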